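-- pv_equiv track=rewrite | github.com/cs-vsu-ru/site-api | parser/app/lessons/services/converters/group.py | _combine_consecutive_groups
-- ===== SOURCE A (Python) =====
-- def _combine_consecutive_groups(full_groups: list[int]) -> list[str]:
--     full_groups.sort()
--     ranges = []
--     for group in full_groups:
--         if ranges and group == ranges[-1][-1] + 1:
--             ranges[-1][-1] = group
--         else:
--             ranges.append([group, group])
--     return [
--         f"{start}-{end}" if start != end else str(start) for start, end in ranges
--     ]
-- ===== SOURCE B (Python) =====
-- def _combine_consecutive_groups(full_groups: list[int]) -> list[str]:
--     full_groups.sort()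
--     fs = full_groups
--     if not fs:
--         return []
--     # boundary flags: new_run[i] is True iff a new range starts at fs[i+1]
--     new_run = [b != a + 1 for a, b in zip(fs, fs[1:])]
--     starts = [fs[0]] + [b for b, f in zip(fs[1:], new_run) if f]
--     ends = [a for a, f in zip(fs, new_run) if f] + [fs[-1]]
--     return [f"{s}-{e}" if s != e else str(s) for s, e in zip(starts, ends)]
-- ===== Notes on version B (the rewrite author's own statement) =====
-- stated objective: alternative
-- what changed: Instead of A's single loop that merges runs by mutating the last [start,end] entry of a growing range list, B works in staged whole-list passes: it computes boundary flags from neighbour pairs (zip of the list with its tail), derives the list of run starts and the list of run ends by filtering zips against those flags, and finally zips starts with ends to format.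
import Mathlib
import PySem

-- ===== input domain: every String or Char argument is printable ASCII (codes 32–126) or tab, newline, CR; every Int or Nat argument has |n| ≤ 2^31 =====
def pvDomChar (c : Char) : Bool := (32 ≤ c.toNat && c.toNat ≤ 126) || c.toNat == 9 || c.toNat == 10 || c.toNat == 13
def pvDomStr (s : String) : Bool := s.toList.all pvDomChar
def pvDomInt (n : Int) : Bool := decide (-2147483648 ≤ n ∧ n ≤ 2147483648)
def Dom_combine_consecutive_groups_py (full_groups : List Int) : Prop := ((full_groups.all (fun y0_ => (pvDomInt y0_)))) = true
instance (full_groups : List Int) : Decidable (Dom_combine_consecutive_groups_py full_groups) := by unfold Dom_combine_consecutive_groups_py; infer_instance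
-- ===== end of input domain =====

-- B replaces A's run-merging loop over a mutable list of [start, end] ranges by three staged
-- whole-list passes: neighbour-comparison boundary flags, then the start and end lists obtained
-- by filtering zips with those flags, then a zip of starts with ends (objective: alternative,
-- same cost). Both Pythons sort full_groups in place; the equivalence proved here is about the
-- return value (B performs the same mutation).

-- ===== PORT A =====
-- A's loop body: Python's two-element lists [start, end] are ported as pairs; the in-place
-- update ranges[-1][-1] = group becomes replacing the last pair.
def pvAStep (ranges : List (Int × Int)) (group : Int) : List (Int × Int) :=
  match ranges.getLast? with
  | some last =>
      if group = last.2 + 1 then ranges.dropLast ++ [(last.1, group)]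
      else ranges ++ [(group, group)]
  | none => ranges ++ [(group, group)]

def combine_consecutive_groups_py (full_groups : List Int) : List String :=
  let fs := PySem.List.sorted full_groups (fun x => x)
  let ranges := fs.foldl pvAStep []
  ranges.map (fun se =>
    if se.1 ≠ se.2 then PySem.Int.toStr se.1 ++ "-" ++ PySem.Int.toStr se.2
    else PySem.Int.toStr se.1)

-- ===== PORT B =====
-- Source B's staged passes: zip(fs, fs[1:]) is fs.zip fs.tail; the comprehensions with an 'if f'
-- filter become filter-then-map; fs[-1] on the (matched nonempty) list is getLastD (the default
-- is never used there, so this is exact).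
def combine_consecutive_groups_py_alt (full_groups : List Int) : List String :=
  match PySem.List.sorted full_groups (fun x => x) with
  | [] => []
  | x :: rest =>
      let newRun := ((x :: rest).zip rest).map (fun ab => decide (ab.2 ≠ ab.1 + 1))
      let starts := x :: ((rest.zip newRun).filter (·.2)).map (·.1)
      let ends := (((x :: rest).zip newRun).filter (·.2)).map (·.1) ++ [(x :: rest).getLastD 0]
      (starts.zip ends).map (fun se =>
        if se.1 ≠ se.2 then PySem.Int.toStr se.1 ++ "-" ++ PySem.Int.toStr se.2
        else PySem.Int.toStr se.1)

-- ===== PRECONDITION & SPEC =====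
def Spec_combine_consecutive_groups_py (full_groups : List Int) (out : List String) : Prop := out = combine_consecutive_groups_py_alt full_groups
instance (full_groups : List Int) (out : List String) : Decidable (Spec_combine_consecutive_groups_py full_groups out) := by unfold Spec_combine_consecutive_groups_py; infer_instance

-- ===== CLAIM (what is proved, stated in full; the proofs are below) =====
def Claim_equal_combine_consecutive_groups_py : Prop := ∀ (full_groups : List Int), Dom_combine_consecutive_groups_py full_groups → Spec_combine_consecutive_groups_py full_groups (combine_consecutive_groups_py full_groups)

-- ===== LEMMAS AND PROOFS =====

-- the common formatting function
def pvFmt (se : Int × Int) : String :=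
  if se.1 ≠ se.2 then PySem.Int.toStr se.1 ++ "-" ++ PySem.Int.toStr se.2
  else PySem.Int.toStr se.1

-- maximal-run extraction used as the middle characterisation: given the previous element p and
-- the remaining suffix, return the last element of the current run and the suffix after the run
def pvScanRun (p : Int) : List Int → Int × List Int
  | [] => (p, [])
  | g :: rest => if g = p + 1 then pvScanRun g rest else (p, g :: rest)

theorem pvScanRun_len (p : Int) (l : List Int) : (pvScanRun p l).2.length ≤ l.length := by
  induction l generalizing p with
  | nil => simp [pvScanRun]
  | cons g rest ih =>
      simp only [pvScanRun]
      split
      · exact le_trans (ih g) (Nat.le_succ _)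
      · simp

-- the run decomposition of a list, formatted (both ports are proved equal to this)
def pvRuns : List Int → List String
  | [] => []
  | x :: xs => pvFmt (x, (pvScanRun x xs).1) :: pvRuns (pvScanRun x xs).2
termination_by l => l.length
decreasing_by simpa using Nat.lt_succ_of_le (pvScanRun_len x xs)

-- ---- A side: A's range list after processing l when the last range is (st, p) ----
def pvChain (st p : Int) : List Int → List (Int × Int)
  | [] => [(st, p)]
  | g :: rest => if g = p + 1 then pvChain st g rest else (st, p) :: pvChain g g rest

def pvChainL : List Int → List (Int × Int)
  | [] => []
  | g :: rest => pvChain g g rest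

theorem foldl_pvAStep (l : List Int) : ∀ (acc : List (Int × Int)) (st p : Int),
    l.foldl pvAStep (acc ++ [(st, p)]) = acc ++ pvChain st p l := by
  induction l with
  | nil => intro acc st p; simp [pvChain]
  | cons g rest ih =>
      intro acc st p
      rw [List.foldl_cons]
      by_cases h : g = p + 1
      · have hstep : pvAStep (acc ++ [(st, p)]) g = acc ++ [(st, g)] := by
          simp [pvAStep, h]
        rw [hstep, ih acc st g]
        simp [pvChain, h]
      · have hstep : pvAStep (acc ++ [(st, p)]) g = (acc ++ [(st, p)]) ++ [(g, g)] := by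
          simp [pvAStep, h]
        rw [hstep, ih (acc ++ [(st, p)]) g g]
        simp [pvChain, h]

theorem foldl_pvAStep_nil (l : List Int) : l.foldl pvAStep [] = pvChainL l := by
  cases l with
  | nil => rfl
  | cons x xs =>
      have hstep : pvAStep [] x = [] ++ [(x, x)] := by simp [pvAStep]
      rw [List.foldl_cons, hstep, foldl_pvAStep xs [] x x]
      rfl

theorem pvChain_scan (l : List Int) : ∀ (st p : Int),
    pvChain st p l = (st, (pvScanRun p l).1) :: pvChainL (pvScanRun p l).2 := by
  induction l with
  | nil => intro st p; simp [pvChain, pvScanRun, pvChainL]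
  | cons g rest ih =>
      intro st p
      simp only [pvChain, pvScanRun]
      by_cases h : g = p + 1
      · simp only [if_pos h, ih st g]
      · simp [if_neg h, pvChainL]

theorem map_pvChainL (l : List Int) : (pvChainL l).map pvFmt = pvRuns l := by
  induction hn : l.length using Nat.strong_induction_on generalizing l with
  | _ n ih =>
      cases l with
      | nil => simp [pvChainL, pvRuns]
      | cons x xs =>
          rw [pvChainL, pvChain_scan, List.map_cons, pvRuns]
          refine congrArg₂ _ rfl ?_
          exact ih ((pvScanRun x xs).2.length)
            (by rw [← hn]; simpa using Nat.lt_succ_of_le (pvScanRun_len x xs)) _ rfl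

-- ---- B side: the staged passes, written over an explicit head so induction can step runs ----
def pvFlags (fs : List Int) : List Bool :=
  (fs.zip fs.tail).map (fun ab => decide (ab.2 ≠ ab.1 + 1))

def pvS (fs : List Int) : List Int :=
  ((fs.tail.zip (pvFlags fs)).filter (·.2)).map (·.1)

def pvE (fs : List Int) : List Int :=
  ((fs.zip (pvFlags fs)).filter (·.2)).map (·.1)

-- the key lemma: starts/ends zipping of a nonempty list (with a free first start h) is exactly
-- the run decomposition
theorem pvB_runs (ys : List Int) : ∀ (y h : Int),
    ((h :: pvS (y :: ys)).zip (pvE (y :: ys) ++ [(y :: ys).getLastD 0])).map pvFmt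
      = pvFmt (h, (pvScanRun y ys).1) :: pvRuns (pvScanRun y ys).2 := by
  induction ys with
  | nil => intro y h; simp [pvS, pvE, pvFlags, pvScanRun, pvRuns]
  | cons g rest ih =>
      intro y h
      have hflags : pvFlags (y :: g :: rest) = decide (g ≠ y + 1) :: pvFlags (g :: rest) := by
        simp [pvFlags]
      by_cases hg : g = y + 1
      · subst hg
        have hS : pvS (y :: (y + 1) :: rest) = pvS ((y + 1) :: rest) := by
          simp [pvS, pvFlags]
        have hE : pvE (y :: (y + 1) :: rest) = pvE ((y + 1) :: rest) := by
          simp [pvE, pvFlags]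
        have hlast : (y :: (y + 1) :: rest).getLastD 0 = ((y + 1) :: rest).getLastD 0 := by
          simp
        rw [hS, hE, hlast, ih (y + 1) h]
        simp [pvScanRun]
      · have hS : pvS (y :: g :: rest) = g :: pvS (g :: rest) := by
          simp [pvS, hflags, hg]
        have hE : pvE (y :: g :: rest) = y :: pvE (g :: rest) := by
          simp [pvE, hflags, hg]
        have hlast : (y :: g :: rest).getLastD 0 = (g :: rest).getLastD 0 := by
          simp
        rw [hS, hE, hlast]
        simp only [List.cons_append, List.zip_cons_cons, List.map_cons]
        rw [ih g g]
        simp [pvScanRun, hg, pvRuns]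

theorem pvAlt_runs (full_groups : List Int) :
    combine_consecutive_groups_py_alt full_groups
      = pvRuns (PySem.List.sorted full_groups (fun x => x)) := by
  unfold combine_consecutive_groups_py_alt
  cases h : PySem.List.sorted full_groups (fun x => x) with
  | nil => simp [pvRuns]
  | cons x rest =>
      simp only []
      have hb := pvB_runs rest x x
      simp only [pvS, pvE, pvFlags, List.tail_cons] at hb
      rw [show (fun se : Int × Int =>
            if se.1 ≠ se.2 then PySem.Int.toStr se.1 ++ "-" ++ PySem.Int.toStr se.2
            else PySem.Int.toStr se.1) = pvFmt from rfl]
      rw [hb, pvRuns]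

-- ===== VERDICT (by name: the statement is the Claim_ definition above) =====
theorem combine_consecutive_groups_py_spec : Claim_equal_combine_consecutive_groups_py := by
  intro full_groups _
  simp only [Spec_combine_consecutive_groups_py, combine_consecutive_groups_py]
  rw [foldl_pvAStep_nil]
  rw [show (fun se : Int × Int =>
        if se.1 ≠ se.2 then PySem.Int.toStr se.1 ++ "-" ++ PySem.Int.toStr se.2
        else PySem.Int.toStr se.1) = pvFmt from rfl]
  rw [map_pvChainL, pvAlt_runs full_groups]
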